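-- pv_equiv track=rewrite | github.com/dev-quitcode/Project-Automatron | orchestrator/orchestrator/github_actions/manager.py | _select_workflow_run
-- ===== SOURCE A (Python) =====
-- from typing import Any
--
-- def _select_workflow_run(
--
--     runs: list[dict[str, Any]],
--     workflow_name: str,
--     preferred_branches: list[str],
-- ) -> dict[str, Any] | None:
--     ordered_branches = [branch for branch in preferred_branches if branch]
--     for branch in ordered_branches:
--         for run in runs:
--             if run.get("name") == workflow_name and run.get("head_branch") == branch:
--                 return run
--     for run in runs:
--         if run.get("name") == workflow_name:
--             return run
--     return None
-- ===== SOURCE B (Python) =====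
-- def _select_workflow_run(runs, workflow_name, preferred_branches):
--     # One pass over runs: index first matching run per head_branch + first overall match,
--     # then a single scan over preferred_branches.
--     by_branch = {}
--     first_match = None
--     for run in runs:
--         if run.get("name") == workflow_name:
--             if first_match is None:
--                 first_match = run
--             by_branch.setdefault(run.get("head_branch"), run)
--     for branch in preferred_branches:
--         if branch and branch in by_branch:
--             return by_branch[branch]
--     return first_match
-- ===== Notes on version B (the rewrite author's own statement) =====
-- stated objective: faster
-- what changed: Replaces the O(B*R) nested branch-by-branch rescans with a single pass over runs building a head_branch->first-matching-run index plus the first overall match, then one scan over the branches.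
import Mathlib
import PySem

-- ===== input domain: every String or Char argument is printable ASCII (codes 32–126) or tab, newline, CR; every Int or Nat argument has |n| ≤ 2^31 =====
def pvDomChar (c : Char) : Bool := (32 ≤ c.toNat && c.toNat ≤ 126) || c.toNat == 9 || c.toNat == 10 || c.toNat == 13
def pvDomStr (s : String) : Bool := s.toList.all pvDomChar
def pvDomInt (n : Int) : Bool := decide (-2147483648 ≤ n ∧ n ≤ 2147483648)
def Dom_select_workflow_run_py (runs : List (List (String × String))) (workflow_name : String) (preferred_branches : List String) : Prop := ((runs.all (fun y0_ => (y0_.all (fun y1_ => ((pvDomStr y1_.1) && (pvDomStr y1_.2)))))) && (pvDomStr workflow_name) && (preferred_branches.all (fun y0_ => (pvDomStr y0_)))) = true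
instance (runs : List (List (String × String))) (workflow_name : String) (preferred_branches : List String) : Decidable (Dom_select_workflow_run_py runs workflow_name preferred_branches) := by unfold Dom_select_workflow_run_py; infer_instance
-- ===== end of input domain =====

-- B replaces A's branch-by-branch rescans of runs with one indexing pass over runs plus one scan over branches (objective: faster).


-- run.get(key): first-match lookup in the run's association list (shared getter helper)
def pvGet (run : List (String × String)) (k : String) : Option String :=
  (PySem.Dict.mk run).get? k

-- ===== PORT A =====
-- inner loop: 'for run in runs: if run.get("name") == workflow_name and run.get("head_branch") == branch: return run'
def pvAInner (wn b : String) : List (List (String × String)) → Option (List (String × String))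
  | [] => none
  | r :: rest =>
    if pvGet r "name" == some wn && pvGet r "head_branch" == some b then some r
    else pvAInner wn b rest

-- outer loop over ordered_branches
def pvAOuter (runs : List (List (String × String))) (wn : String) : List String → Option (List (String × String))
  | [] => none
  | b :: rest =>
    match pvAInner wn b runs with
    | some r => some r
    | none => pvAOuter runs wn rest

-- fallback loop: first run with a matching name
def pvAFallback (wn : String) : List (List (String × String)) → Option (List (String × String))
  | [] => none
  | r :: rest => if pvGet r "name" == some wn then some r else pvAFallback wn rest

def select_workflow_run_py (runs : List (List (String × String))) (workflow_name : String) (preferred_branches : List String) : Option (List (String × String)) :=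
  let ordered_branches := preferred_branches.filter (fun b => b ≠ "")
  match pvAOuter runs workflow_name ordered_branches with
  | some r => some r
  | none => pvAFallback workflow_name runs

-- ===== PORT B =====
-- one indexing pass: by_branch.setdefault(run.get("head_branch"), run) + first_match
def pvBStep (wn : String)
    (st : PySem.Dict (Option String) (List (String × String)) × Option (List (String × String)))
    (run : List (String × String)) :
    PySem.Dict (Option String) (List (String × String)) × Option (List (String × String)) :=
  if pvGet run "name" == some wn then
    (st.1.setdefault (pvGet run "head_branch") run,
     match st.2 with
     | none => some run
     | some x => some x)
  else st

-- 'for branch in preferred_branches: if branch and branch in by_branch: return by_branch[branch]'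
def pvBPick (d : PySem.Dict (Option String) (List (String × String))) : List String → Option (List (String × String))
  | [] => none
  | b :: rest => if b ≠ "" && d.contains (some b) then d.get? (some b) else pvBPick d rest

def select_workflow_run_py_alt (runs : List (List (String × String))) (workflow_name : String) (preferred_branches : List String) : Option (List (String × String)) :=
  let st := runs.foldl (pvBStep workflow_name) (PySem.Dict.empty, none)
  match pvBPick st.1 preferred_branches with
  | some r => some r
  | none => st.2

-- ===== PRECONDITION & SPEC =====
def Spec_select_workflow_run_py (runs : List (List (String × String))) (workflow_name : String) (preferred_branches : List String) (out : Option (List (String × String))) : Prop := out = select_workflow_run_py_alt runs workflow_name preferred_branches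
instance (runs : List (List (String × String))) (workflow_name : String) (preferred_branches : List String) (out : Option (List (String × String))) : Decidable (Spec_select_workflow_run_py runs workflow_name preferred_branches out) := by unfold Spec_select_workflow_run_py; infer_instance

-- ===== CLAIM (what is proved, stated in full; the proofs are below) =====
def Claim_equal_select_workflow_run_py : Prop := ∀ (runs : List (List (String × String))) (workflow_name : String) (preferred_branches : List String), Dom_select_workflow_run_py runs workflow_name preferred_branches → Spec_select_workflow_run_py runs workflow_name preferred_branches (select_workflow_run_py runs workflow_name preferred_branches)

-- ===== LEMMAS AND PROOFS =====

-- generalisation of pvAInner to an arbitrary looked-up head_branch value (proof-side only)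
def pvFind (wn : String) (k : Option String) : List (List (String × String)) → Option (List (String × String))
  | [] => none
  | r :: rest =>
    if pvGet r "name" == some wn && pvGet r "head_branch" == k then some r
    else pvFind wn k rest

theorem pvFind_some (wn b : String) (runs : List (List (String × String))) :
    pvFind wn (some b) runs = pvAInner wn b runs := by
  induction runs with
  | nil => rfl
  | cons r rest ih => simp [pvFind, pvAInner, ih]

theorem pvB_fst (wn : String) (k : Option String) :
    ∀ (runs : List (List (String × String)))
      (d : PySem.Dict (Option String) (List (String × String)))
      (fm : Option (List (String × String))),
      ((runs.foldl (pvBStep wn) (d, fm)).1).get? k = (d.get? k).or (pvFind wn k runs) := by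
  intro runs
  induction runs with
  | nil => intro d fm; cases h : d.get? k <;> simp [pvFind, h, Option.or]
  | cons r rest ih =>
    intro d fm
    rw [List.foldl_cons]
    by_cases hn : (pvGet r "name" == some wn) = true
    · have hstep : pvBStep wn (d, fm) r
          = (d.setdefault (pvGet r "head_branch") r,
             match fm with | none => some r | some x => some x) := by
        simp [pvBStep, hn]
      rw [hstep, ih]
      by_cases hc : d.contains (pvGet r "head_branch") = true
      · rw [PySem.Dict.setdefault_of_contains _ _ hc]
        by_cases hk : (pvGet r "head_branch" == k) = true
        · have hkk : pvGet r "head_branch" = k := eq_of_beq hk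
          subst hkk
          have hs : (d.get? (pvGet r "head_branch")).isSome := by
            rw [← PySem.Dict.contains_eq_isSome_get?]; exact hc
          cases h : d.get? (pvGet r "head_branch") with
          | none => rw [h] at hs; simp at hs
          | some v => simp [Option.or]
        · simp [pvFind, hn, hk]
      · rw [PySem.Dict.setdefault_of_not_contains _ _ (by simpa using hc)]
        have hd : d.get? (pvGet r "head_branch") = none := by
          have hs := PySem.Dict.contains_eq_isSome_get? d (pvGet r "head_branch")
          cases h : d.get? (pvGet r "head_branch") with
          | none => rfl
          | some v => rw [h] at hs; simp at hs; exact absurd hs hc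
        by_cases hk : (pvGet r "head_branch" == k) = true
        · have hkk : pvGet r "head_branch" = k := eq_of_beq hk
          subst hkk
          rw [PySem.Dict.get?_insert_self, hd]
          simp [pvFind, hn, Option.or]
        · have hne : k ≠ pvGet r "head_branch" := fun h => by subst h; simp at hk
          rw [PySem.Dict.get?_insert_of_ne _ _ hne]
          simp [pvFind, hn, hk]
    · have hstep : pvBStep wn (d, fm) r = (d, fm) := by simp [pvBStep, hn]
      rw [hstep, ih]
      simp [pvFind, hn]

theorem pvB_snd (wn : String) :
    ∀ (runs : List (List (String × String)))
      (d : PySem.Dict (Option String) (List (String × String)))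
      (fm : Option (List (String × String))),
      (runs.foldl (pvBStep wn) (d, fm)).2 = fm.or (pvAFallback wn runs) := by
  intro runs
  induction runs with
  | nil => intro d fm; cases fm <;> simp [pvAFallback, Option.or]
  | cons r rest ih =>
    intro d fm
    rw [List.foldl_cons]
    by_cases hn : (pvGet r "name" == some wn) = true
    · have hstep : pvBStep wn (d, fm) r
          = (d.setdefault (pvGet r "head_branch") r,
             match fm with | none => some r | some x => some x) := by
        simp [pvBStep, hn]
      rw [hstep, ih]
      cases fm <;> simp [pvAFallback, hn, Option.or]
    · have hstep : pvBStep wn (d, fm) r = (d, fm) := by simp [pvBStep, hn]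
      rw [hstep, ih]
      simp [pvAFallback, hn]

theorem pvPick_eq_outer (wn : String) (runs : List (List (String × String)))
    (d : PySem.Dict (Option String) (List (String × String)))
    (hd : ∀ b : String, d.get? (some b) = pvAInner wn b runs) :
    ∀ pbs : List String,
      pvBPick d pbs = pvAOuter runs wn (pbs.filter (fun b => b ≠ "")) := by
  intro pbs
  induction pbs with
  | nil => rfl
  | cons b rest ih =>
    by_cases hb : b = ""
    · subst hb
      simp [pvBPick, List.filter, ih]
    · have hc := PySem.Dict.contains_eq_isSome_get? (d := d) (k := some b)
      rw [hd b] at hc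
      simp only [pvBPick, List.filter_cons, ne_eq, hb, not_false_iff, decide_true, if_true]
      simp only [pvAOuter]
      cases h : pvAInner wn b runs with
      | some r =>
        have hct : d.contains (some b) = true := by rw [hc, h]; rfl
        rw [if_pos (by simp [hct]), hd b, h]
      | none =>
        have hcf : d.contains (some b) = false := by rw [hc, h]; rfl
        rw [if_neg (by simp [hcf]), ih]

-- ===== VERDICT (by name: the statement is the Claim_ definition above) =====
theorem select_workflow_run_py_spec : Claim_equal_select_workflow_run_py := by
  intro runs wn pbs _
  unfold Spec_select_workflow_run_py
  show select_workflow_run_py runs wn pbs = _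
  have h1 : ∀ b : String,
      ((runs.foldl (pvBStep wn) (PySem.Dict.empty, none)).1).get? (some b) = pvAInner wn b runs := by
    intro b
    rw [pvB_fst, ← pvFind_some]
    simp [PySem.Dict.get?_empty, Option.or]
  show (match pvAOuter runs wn (pbs.filter (fun b => b ≠ "")) with
        | some r => some r
        | none => pvAFallback wn runs) =
      (match pvBPick (runs.foldl (pvBStep wn) (PySem.Dict.empty, none)).1 pbs with
        | some r => some r
        | none => (runs.foldl (pvBStep wn) (PySem.Dict.empty, none)).2)
  rw [pvB_snd, pvPick_eq_outer wn runs _ h1 pbs]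
  simp [Option.or]
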